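-- pv_equiv track=rewrite | github.com/ecassmage/Python | School/equiv.py | classEquiv
-- ===== SOURCE A (Python) =====
-- def classEquiv(lowerRange=0, upperRange=25):
--     classNums = []
--     equalityNum = 5
--     for i in range(upperRange):
--         string = str(i)
--         sumTemp = 0
--         for num in string:
--             sumTemp += int(num)
--         if sumTemp == equalityNum:
--             classNums.append(i)
--     return classNums
-- ===== SOURCE B (Python) =====
-- def classEquiv(lowerRange=0, upperRange=25):
--     # Per ten-block: every i < upperRange is 10*q + d with 0 <= d <= 9, and
--     # digitsum(10*q + d) = digitsum(q) + d, so each block contributes at most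
--     # the single candidate d = 5 - digitsum(q).  One digit-sum per block of 10.
--     classNums = []
--     q = 0
--     while 10 * q < upperRange:
--         t = 0
--         n = q
--         while n > 0:
--             t += n % 10
--             n //= 10
--         d = 5 - t
--         if 0 <= d <= 9 and 10 * q + d < upperRange:
--             classNums.append(10 * q + d)
--         q += 1
--     return classNums
-- ===== Notes on version B (the rewrite author's own statement) =====
-- stated objective: faster
-- what changed: Instead of converting every i < upperRange to a string and summing its digit characters, B walks ten-blocks: for each q with 10*q < upperRange it computes digitsum(q) arithmetically once and emits the unique candidate 10*q + (5 - digitsum(q)) of that block when it is a digit and below the bound, so only one digit-sum per ten numbers and no string conversions.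
import Mathlib
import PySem

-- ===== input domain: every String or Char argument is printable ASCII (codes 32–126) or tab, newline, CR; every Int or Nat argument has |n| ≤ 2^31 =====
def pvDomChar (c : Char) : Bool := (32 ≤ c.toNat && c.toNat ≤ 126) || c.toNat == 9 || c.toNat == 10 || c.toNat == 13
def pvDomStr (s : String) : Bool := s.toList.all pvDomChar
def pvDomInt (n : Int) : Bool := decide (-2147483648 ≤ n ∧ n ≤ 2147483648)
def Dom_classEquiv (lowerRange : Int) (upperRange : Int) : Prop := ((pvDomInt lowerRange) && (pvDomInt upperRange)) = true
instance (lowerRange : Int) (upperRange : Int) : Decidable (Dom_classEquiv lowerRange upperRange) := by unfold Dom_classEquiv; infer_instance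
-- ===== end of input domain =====

-- B replaces the per-number string digit sum over all of range(upperRange) by one arithmetic
-- digit sum per ten-block, emitting the block's unique digit-sum-5 candidate (objective: faster).

-- ===== PORT A =====
-- int(num) is applied only to single digit characters of str(i), i ≥ 0, so it never raises;
-- its Option is read with getD 0, which is never hit.
def classEquiv (lowerRange : Int) (upperRange : Int) : List Int :=
  let equalityNum : Int := 5
  (PySem.List.pyRange 0 upperRange 1).foldl (fun classNums i =>
    let string := PySem.Int.toStr i
    let sumTemp := string.toList.foldl
      (fun sumTemp num => sumTemp + (PySem.Int.ofChars? [num]).getD 0) 0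
    if sumTemp = equalityNum then classNums ++ [i] else classNums) []

-- ===== PORT B =====
-- inner 'while n > 0: t += n % 10; n //= 10'  (n stays ≥ 0, so Nat % and / match Python here)
def altDigitSum (t : Int) (n : Nat) : Int :=
  if h : 0 < n then altDigitSum (t + (n % 10 : Nat)) (n / 10) else t
termination_by n
decreasing_by exact Nat.div_lt_self h (by norm_num)

-- outer 'while 10 * q < upperRange' loop (q stays ≥ 0, so it is a Nat)
def altBlockLoop (upperRange : Int) (q : Nat) (classNums : List Int) : List Int :=
  if h : 10 * (q : Int) < upperRange then
    let t := altDigitSum 0 q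
    let d := 5 - t
    let classNums' :=
      if 0 ≤ d ∧ d ≤ 9 ∧ 10 * (q : Int) + d < upperRange
      then classNums ++ [10 * (q : Int) + d] else classNums
    altBlockLoop upperRange (q + 1) classNums'
  else classNums
termination_by (upperRange - 10 * (q : Int)).toNat
decreasing_by
  have : (10 : Int) * (q : Int) < upperRange := h
  omega

def classEquiv_alt (lowerRange : Int) (upperRange : Int) : List Int :=
  altBlockLoop upperRange 0 []

-- ===== PRECONDITION & SPEC =====
def Spec_classEquiv (lowerRange : Int) (upperRange : Int) (out : List Int) : Prop := out = classEquiv_alt lowerRange upperRange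
instance (lowerRange : Int) (upperRange : Int) (out : List Int) : Decidable (Spec_classEquiv lowerRange upperRange out) := by unfold Spec_classEquiv; infer_instance

-- ===== CLAIM (what is proved, stated in full; the proofs are below) =====
def Claim_equal_classEquiv : Prop := ∀ (lowerRange : Int) (upperRange : Int), Dom_classEquiv lowerRange upperRange → Spec_classEquiv lowerRange upperRange (classEquiv lowerRange upperRange)

-- ===== LEMMAS AND PROOFS =====

/-- Arithmetic digit sum, the common specification both sides are reduced to. -/
def pvDs (n : Nat) : Nat := (Nat.digits 10 n).sum

lemma pvDs_zero : pvDs 0 = 0 := by simp [pvDs]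

lemma pvDs_step (n : Nat) (hn : 0 < n) : pvDs n = n % 10 + pvDs (n / 10) := by
  unfold pvDs
  rw [Nat.digits_def' (by norm_num : (1:Nat) < 10) hn]
  simp

lemma pvDs_ten (q d : Nat) (hd : d < 10) : pvDs (10 * q + d) = pvDs q + d := by
  rcases Nat.eq_zero_or_pos (10 * q + d) with h | h
  · have hq : q = 0 := by omega
    have hd0 : d = 0 := by omega
    subst hq; subst hd0; simp [pvDs_zero]
  · rw [pvDs_step _ h]
    have h1 : (10 * q + d) % 10 = d := by omega
    have h2 : (10 * q + d) / 10 = q := by omega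
    rw [h1, h2]; omega

lemma pvDigitVal (k : Nat) (hk : k < 10) :
    (PySem.Int.ofChars? [Nat.digitChar k]).getD 0 = (k : Int) := by
  interval_cases k <;> decide

/-- Digit-sum of the characters `Nat.toDigitsCore` emits. -/
lemma pvCore (f : Nat) : ∀ (n : Nat), n ≤ f → ∀ (acc : List Char) (s : Int),
    (Nat.toDigitsCore 10 (f + 1) n acc).foldl
        (fun a c => a + (PySem.Int.ofChars? [c]).getD 0) s
    = acc.foldl (fun a c => a + (PySem.Int.ofChars? [c]).getD 0) (s + (pvDs n : Int)) := by
  induction f with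
  | zero =>
    intro n hn acc s
    have h0 : n = 0 := by omega
    subst h0
    simp [Nat.toDigitsCore, pvDs_zero]
    rw [pvDigitVal 0 (by norm_num)]
    simp
  | succ f ih =>
    intro n hn acc s
    by_cases h : n / 10 = 0
    · have hlt : n < 10 := by omega
      conv_lhs => rw [Nat.toDigitsCore]
      simp only [h, reduceIte]
      rw [List.foldl_cons]
      have hm : n % 10 = n := by omega
      rw [hm, pvDigitVal n hlt]
      have : pvDs n = n := by
        rcases Nat.eq_zero_or_pos n with h0 | h0
        · subst h0; simp [pvDs_zero]
        · rw [pvDs_step n h0, h, pvDs_zero]; omega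
      rw [this]
    · conv_lhs => rw [Nat.toDigitsCore]
      simp only [h, reduceIte]
      rw [ih (n / 10) (by omega) _ s, List.foldl_cons]
      have hlt : n % 10 < 10 := by omega
      rw [pvDigitVal _ hlt]
      have hds : pvDs n = n % 10 + pvDs (n / 10) := pvDs_step n (by omega)
      rw [hds]
      push_cast
      ring_nf

/-- The string digit sum A computes equals the arithmetic digit sum, for m ≥ 0. -/
lemma pvStrSum (m : Nat) :
    ((PySem.Int.toStr (m : Int)).toList.foldl
        (fun a c => a + (PySem.Int.ofChars? [c]).getD 0) 0) = (pvDs m : Int) := by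
  rw [PySem.Int.toList_toStr]
  have hne : ¬ ((m : Int) < 0) := by omega
  show (PySem.Int.toChars (m : Int)).foldl _ 0 = _
  rw [PySem.Int.toChars]
  simp only [hne, reduceIte, Int.toNat_natCast]
  rw [Nat.toDigits]
  rw [pvCore m m le_rfl [] 0]
  simp

lemma pvFoldlIfMap (p : Nat → Bool) :
    ∀ (l : List Nat) (acc : List Int),
    l.foldl (fun a m => if p m then a ++ [(m : Int)] else a) acc
    = acc ++ (l.filter p).map (Nat.cast : Nat → Int) := by
  intro l
  induction l with
  | nil => intro acc; simp
  | cons x xs ih =>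
    intro acc
    by_cases hx : p x
    · simp [List.foldl_cons, hx, ih, List.filter_cons]
    · simp [List.foldl_cons, hx, ih, List.filter_cons]

/-- A in closed form: the ascending digit-sum-5 numbers below the bound. -/
lemma pvA_eq (lowerRange upperRange : Int) :
    classEquiv lowerRange upperRange
    = ((List.range upperRange.toNat).filter (fun m => pvDs m = 5)).map (Nat.cast : Nat → Int) := by
  unfold classEquiv
  rw [PySem.List.pyRange_one]
  rw [List.foldl_map]
  have hfun : (fun (classNums : List Int) (y : Nat) =>
      if (PySem.Int.toStr ((0 : Int) + (y : Int))).toList.foldl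
          (fun sumTemp num => sumTemp + (PySem.Int.ofChars? [num]).getD 0) 0 = (5 : Int)
      then classNums ++ [(0 : Int) + (y : Int)] else classNums)
      = fun (a : List Int) (m : Nat) => if (decide (pvDs m = 5) : Bool) then a ++ [(m : Int)] else a := by
    funext a m
    rw [zero_add, pvStrSum m]
    by_cases h : pvDs m = 5
    · simp [h]
    · have h' : ¬ ((pvDs m : Int) = 5) := by exact_mod_cast h
      simp [h, h']
  show List.foldl _ [] _ = _
  rw [hfun, pvFoldlIfMap (fun m => decide (pvDs m = 5)) _ []]
  simp

lemma pvDigitLoop (n : Nat) : ∀ (t : Int), altDigitSum t n = t + (pvDs n : Int) := by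
  induction n using Nat.strong_induction_on with
  | _ n ih =>
    intro t
    rw [altDigitSum]
    by_cases h : 0 < n
    · simp only [h, reduceDIte]
      rw [ih (n / 10) (Nat.div_lt_self h (by norm_num))]
      have := pvDs_step n h
      omega
    · simp only [h, reduceDIte]
      have h0 : n = 0 := by omega
      subst h0
      simp [pvDs_zero]

/-- Filter of one (possibly truncated) ten-block: at most the single candidate survives. -/
lemma pvFiltBlock (q : Nat) : ∀ (c : Nat), c ≤ 10 →
    (List.range' (10 * q) c).filter (fun m => pvDs m = 5)
    = if pvDs q ≤ 5 ∧ 5 - pvDs q < c then [10 * q + (5 - pvDs q)] else [] := by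
  intro c
  induction c with
  | zero => intro _; simp
  | succ c ih =>
    intro hc
    rw [List.range'_concat, List.filter_append, ih (by omega)]
    simp only [one_mul]
    have hkey : pvDs (10 * q + c) = pvDs q + c := pvDs_ten q c (by omega)
    by_cases h5 : pvDs q + c = 5
    · have e1 : ¬ (pvDs q ≤ 5 ∧ 5 - pvDs q < c) := by omega
      have e2 : pvDs q ≤ 5 ∧ 5 - pvDs q < c + 1 := ⟨by omega, by omega⟩
      rw [if_neg e1, if_pos e2, List.nil_append]
      have hd : pvDs (10 * q + c) = 5 := by omega
      have hfs : List.filter (fun m => decide (pvDs m = 5)) [10 * q + c] = [10 * q + c] := by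
        simp [List.filter, hd]
      rw [hfs]
      have hc5 : c = 5 - pvDs q := by omega
      rw [hc5]
    · have hne : ¬ pvDs (10 * q + c) = 5 := by omega
      have hfs : List.filter (fun m => decide (pvDs m = 5)) [10 * q + c] = [] := by
        simp [List.filter, hne]
      rw [hfs, List.append_nil]
      have hiff : (pvDs q ≤ 5 ∧ 5 - pvDs q < c + 1) ↔ (pvDs q ≤ 5 ∧ 5 - pvDs q < c) := by omega
      simp only [hiff]

/-- The outer loop of B builds exactly the filtered tail range. -/
lemma pvBlockMain (U : Int) : ∀ (k q : Nat) (acc : List Int),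
    (U - 10 * (q : Int)).toNat ≤ k →
    altBlockLoop U q acc
    = acc ++ ((List.range' (10 * q) (U.toNat - 10 * q)).filter (fun m => pvDs m = 5)).map
        (Nat.cast : Nat → Int) := by
  intro k
  induction k with
  | zero =>
    intro q acc hk
    have hstop : ¬ (10 * (q : Int) < U) := by omega
    rw [altBlockLoop]
    simp only [hstop, reduceDIte]
    have hz : U.toNat - 10 * q = 0 := by omega
    rw [hz]; simp
  | succ k ih =>
    intro q acc hk
    by_cases h : 10 * (q : Int) < U
    · rw [altBlockLoop]
      simp only [h, reduceDIte]
      rw [pvDigitLoop q 0, zero_add]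
      set t := pvDs q with ht
      rw [ih (q + 1) _ (by omega)]
      -- split the head range into the current block (length min 10 L) and the tail
      have hL : 0 < U.toNat - 10 * q := by omega
      set L : Nat := U.toNat - 10 * q with hLdef
      have hsplit : List.range' (10 * q) L
          = List.range' (10 * q) (min 10 L) ++ List.range' (10 * q + 1 * min 10 L) (L - min 10 L) := by
        rw [List.range'_append]
        congr 1
        omega
      rw [hsplit, List.filter_append, List.map_append]
      have htail : List.range' (10 * q + 1 * min 10 L) (L - min 10 L)
          = List.range' (10 * (q + 1)) (U.toNat - 10 * (q + 1)) := by
        by_cases h10 : 10 ≤ L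
        · have h1 : min 10 L = 10 := by omega
          rw [h1]; congr 1 <;> omega
        · have h1 : L - min 10 L = 0 := by omega
          have h2 : U.toNat - 10 * (q + 1) = 0 := by omega
          rw [h1, h2]; simp
      rw [htail]
      rw [pvFiltBlock q (min 10 L) (by omega)]
      -- match B's candidate condition with the filter's
      have hcand : (0 ≤ 5 - (t : Int) ∧ 5 - (t : Int) ≤ 9 ∧ 10 * (q : Int) + (5 - (t : Int)) < U)
          ↔ (t ≤ 5 ∧ 5 - t < min 10 L) := by
        constructor
        · rintro ⟨h1, _, h3⟩
          constructor
          · omega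
          · omega
        · rintro ⟨h1, h2⟩
          refine ⟨by omega, by omega, by omega⟩
      by_cases hcond : t ≤ 5 ∧ 5 - t < min 10 L
      · have hcond' := hcand.mpr hcond
        rw [if_pos hcond', if_pos hcond, List.map_cons, List.map_nil]
        have hval : ((10 * q + (5 - t) : Nat) : Int) = 10 * (q : Int) + (5 - (t : Int)) := by
          omega
        rw [hval]
        simp [List.append_assoc]
      · have hcond' : ¬ (0 ≤ 5 - (t : Int) ∧ 5 - (t : Int) ≤ 9 ∧ 10 * (q : Int) + (5 - (t : Int)) < U) := by
          intro hx; exact hcond (hcand.mp hx)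
        rw [if_neg hcond', if_neg hcond, List.map_nil]
        simp
    · rw [altBlockLoop]
      simp only [h, reduceDIte]
      have hz : U.toNat - 10 * q = 0 := by omega
      rw [hz]; simp

-- ===== VERDICT (by name: the statement is the Claim_ definition above) =====
theorem classEquiv_spec : Claim_equal_classEquiv := by
  intro lowerRange upperRange _
  show classEquiv lowerRange upperRange = classEquiv_alt lowerRange upperRange
  rw [pvA_eq]
  unfold classEquiv_alt
  rw [pvBlockMain upperRange upperRange.toNat 0 [] (by omega)]
  simp [List.range_eq_range']
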